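-- pv_equiv track=rewrite | github.com/vaishnaviborekar16/Python_basics | python_work/assignment_day2/question_9.py | find_nth_number_digits
-- ===== SOURCE A (Python) =====
-- def find_nth_number_digits(n):
--
--
--
--     def num_k_digit_numbers(k):
--         return 4**k
--
--     k = 1
--     count = 0
--     while count + num_k_digit_numbers(k) < n:
--         count += num_k_digit_numbers(k)
--         k += 1
--
--
--     return k
-- ===== SOURCE B (Python) =====
-- def find_nth_number_digits(n):
--     # closed form: smallest k >= 1 with 4^1 + ... + 4^k >= n, i.e. 4^(k+1) >= 3n+4,
--     # computed with integer bit_length instead of the accumulation loop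
--     if n <= 4:
--         return 1
--     return ((3 * n + 3).bit_length() - 1) // 2
-- ===== Notes on version B (the rewrite author's own statement) =====
-- stated objective: faster
-- what changed: Replaced the accumulation loop over group sizes 4^k by a closed form: the answer is the smallest k with 4^(k+1) >= 3n+4, computed directly from (3n+3).bit_length().
import Mathlib
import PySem

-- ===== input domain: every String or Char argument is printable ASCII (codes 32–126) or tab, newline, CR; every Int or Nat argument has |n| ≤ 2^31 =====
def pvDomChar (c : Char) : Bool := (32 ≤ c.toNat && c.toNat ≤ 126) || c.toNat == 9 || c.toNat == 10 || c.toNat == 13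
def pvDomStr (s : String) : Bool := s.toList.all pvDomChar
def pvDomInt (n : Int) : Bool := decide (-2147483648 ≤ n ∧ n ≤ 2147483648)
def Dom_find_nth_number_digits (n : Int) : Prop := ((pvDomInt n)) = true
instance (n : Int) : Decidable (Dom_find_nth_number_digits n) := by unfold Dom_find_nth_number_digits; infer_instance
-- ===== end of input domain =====

-- B replaces A's accumulation loop by a closed form using integer bit_length (faster).

-- ===== PORT A =====
-- Python inner helper num_k_digit_numbers(k) = 4**k  (k ≥ 1 throughout the loop)
def num_k_digit_numbers (k : Int) : Int := 4 ^ k.toNat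

-- the while loop: while count + 4**k < n: count += 4**k; k += 1
def find_nth_number_digits.loop (n k count : Int) : Int :=
  if count + num_k_digit_numbers k < n then
    find_nth_number_digits.loop n (k + 1) (count + num_k_digit_numbers k)
  else k
termination_by (n - count).toNat
decreasing_by
  have h1 : (1:Int) ≤ 4 ^ k.toNat := one_le_pow₀ (by norm_num)
  simp only [num_k_digit_numbers] at *
  omega

def find_nth_number_digits (n : Int) : Int := find_nth_number_digits.loop n 1 0

-- ===== PORT B =====
def find_nth_number_digits_alt (n : Int) : Int :=
  if n ≤ 4 then 1
  else PySem.Int.floordiv (Int.ofNat (PySem.Int.bitLength (3 * n + 3)) - 1) 2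

-- ===== PRECONDITION & SPEC =====
def Spec_find_nth_number_digits (n : Int) (out : Int) : Prop := out = find_nth_number_digits_alt n
instance (n : Int) (out : Int) : Decidable (Spec_find_nth_number_digits n out) := by unfold Spec_find_nth_number_digits; infer_instance

-- ===== CLAIM (what is proved, stated in full; the proofs are below) =====
def Claim_equal_find_nth_number_digits : Prop := ∀ (n : Int), Dom_find_nth_number_digits n → Spec_find_nth_number_digits n (find_nth_number_digits n)

-- ===== LEMMAS AND PROOFS =====

-- pvS k = 4^1 + … + 4^k, the count of base-4 strings of length ≤ k
def pvS : Nat → Int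
  | 0 => 0
  | k+1 => pvS k + 4 ^ (k+1)

lemma three_mul_pvS (k : Nat) : 3 * pvS k = 4 ^ (k+1) - 4 := by
  induction k with
  | zero => simp [pvS]
  | succ k ih => simp only [pvS]; rw [mul_add, ih]; ring

lemma pvS_mono : Monotone pvS := by
  apply monotone_nat_of_le_succ
  intro k
  have : (0:Int) ≤ 4 ^ (k+1) := by positivity
  simp only [pvS]; omega

lemma pvS_pred_add (k : Nat) (h : 1 ≤ k) : pvS (k-1) + 4 ^ k = pvS k := by
  obtain ⟨m, rfl⟩ : ∃ m, k = m + 1 := ⟨k - 1, by omega⟩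
  simp [pvS]

lemma loop_eq (n : Int) (k : Nat) (h1 : pvS (k-1) < n) (h2 : n ≤ pvS k) :
    ∀ d k0, 1 ≤ k0 → k0 + d = k →
      find_nth_number_digits.loop n (k0:Int) (pvS (k0-1)) = (k:Int) := by
  intro d
  induction d with
  | zero =>
    intro k0 hk0 he
    have hk : k0 = k := by omega
    subst hk
    rw [find_nth_number_digits.loop]
    have hnum : num_k_digit_numbers (k0:Int) = 4 ^ k0 := by
      simp [num_k_digit_numbers]
    rw [hnum, pvS_pred_add k0 hk0, if_neg (by omega)]
  | succ d ih =>
    intro k0 hk0 he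
    have hk0k : k0 ≤ k - 1 := by omega
    have hlt : pvS k0 ≤ pvS (k-1) := pvS_mono hk0k
    rw [find_nth_number_digits.loop]
    have hnum : num_k_digit_numbers (k0:Int) = 4 ^ k0 := by
      simp [num_k_digit_numbers]
    rw [hnum, pvS_pred_add k0 hk0, if_pos (by omega)]
    have hc : ((k0:Int) + 1) = ((k0+1 : Nat) : Int) := by push_cast; ring
    have hs : pvS k0 = pvS ((k0+1) - 1) := by simp
    rw [hc, hs]
    exact ih (k0+1) (by omega) (by omega)

-- main interval lemma: for n ≥ 5, B's formula gives the unique k with pvS (k-1) < n ≤ pvS k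
lemma alt_interval (n : Int) (hn : 5 ≤ n) :
    ∃ k : Nat, 1 ≤ k ∧ pvS (k-1) < n ∧ n ≤ pvS k ∧
      find_nth_number_digits_alt n = (k : Int) := by
  set x : Int := 3 * n + 3 with hx
  have hxpos : 0 < x := by omega
  have hxne : x ≠ 0 := by omega
  have hx18 : (18:Int) ≤ x := by omega
  set b : Nat := PySem.Int.bitLength x with hb
  have hub : x.natAbs < 2 ^ b := PySem.Int.lt_two_pow_bitLength x
  have hlb : 2 ^ (b - 1) ≤ x.natAbs := PySem.Int.two_pow_bitLength_le x hxne
  have hxa : (x.natAbs : Int) = x := Int.natAbs_of_nonneg (by omega)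
  have hb5 : 5 ≤ b := by
    by_contra h
    have hb4 : b ≤ 4 := by omega
    have : (2:Nat) ^ b ≤ 2 ^ 4 := Nat.pow_le_pow_right (by norm_num) hb4
    have : x.natAbs < 16 := by omega
    omega
  set l : Nat := b - 1 with hl
  set k : Nat := l / 2 with hk
  have hk2 : 2 ≤ k := by omega
  -- 4^k ≤ x.natAbs < 4^(k+1)
  have h4lb : (4:Nat) ^ k ≤ x.natAbs := by
    calc (4:Nat) ^ k = 2 ^ (2 * k) := by rw [pow_mul]; norm_num
    _ ≤ 2 ^ l := Nat.pow_le_pow_right (by norm_num) (by omega)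
    _ ≤ x.natAbs := hlb
  have h4ub : x.natAbs < (4:Nat) ^ (k+1) := by
    calc x.natAbs < 2 ^ b := hub
    _ ≤ 2 ^ (2 * (k+1)) := Nat.pow_le_pow_right (by norm_num) (by omega)
    _ = 4 ^ (k+1) := by rw [pow_mul]; norm_num
  have h4lbI : (4:Int) ^ k ≤ x := by rw [← hxa]; exact_mod_cast h4lb
  have h4ubI : x < (4:Int) ^ (k+1) := by rw [← hxa]; exact_mod_cast h4ub
  refine ⟨k, by omega, ?_, ?_, ?_⟩
  · -- pvS (k-1) < n  ⟸  4^k ≤ 3n+3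
    have h3 : 3 * pvS (k-1) = 4 ^ ((k-1)+1) - 4 := three_mul_pvS (k-1)
    have hkk : (k-1)+1 = k := by omega
    rw [hkk] at h3
    omega
  · -- n ≤ pvS k  ⟸  3n+3 < 4^(k+1)
    have h3 : 3 * pvS k = 4 ^ (k+1) - 4 := three_mul_pvS k
    omega
  · -- B's value
    unfold find_nth_number_digits_alt
    rw [if_neg (by omega)]
    rw [← hx, ← hb]
    have hcast : Int.ofNat b - 1 = ((l : Nat) : Int) := by
      simp only [Int.ofNat_eq_natCast]; omega
    rw [hcast, PySem.Int.floordiv_eq_ediv_of_pos (by norm_num)]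
    omega

-- ===== VERDICT (by name: the statement is the Claim_ definition above) =====
theorem find_nth_number_digits_spec : Claim_equal_find_nth_number_digits := by
  intro n _
  unfold Spec_find_nth_number_digits
  by_cases hn : n ≤ 4
  · -- loop exits immediately; both sides are 1
    unfold find_nth_number_digits
    rw [find_nth_number_digits.loop]
    have hnum : num_k_digit_numbers 1 = 4 := by decide
    rw [hnum, if_neg (by omega)]
    unfold find_nth_number_digits_alt
    rw [if_pos hn]
  · obtain ⟨k, hk1, h1, h2, halt⟩ := alt_interval n (by omega)
    rw [halt]
    unfold find_nth_number_digits
    have h0 : (0:Int) = pvS (1-1) := by simp [pvS]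
    have hc1 : (1:Int) = ((1:Nat):Int) := by norm_num
    rw [h0, hc1]
    exact loop_eq n k h1 h2 (k-1) 1 (by omega) (by omega)
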